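-- pv_equiv track=rewrite | github.com/mattdavis1121/home-game-poker | poker.py | determine_next_seat
-- ===== SOURCE A (Python) =====
-- def determine_next_seat(prev_seat, seats):
--     try:
--         prev_seat_index = seats.index(prev_seat)
--         return seats[(prev_seat_index + 1) % len(seats)]
--     except ValueError:
--         sorted_seats = sorted(seats)
--         for seat in sorted_seats:
--             if prev_seat < seat:
--                 return seat
--         return sorted_seats[0]
-- ===== SOURCE B (Python) =====
-- def determine_next_seat(prev_seat, seats):
--     if prev_seat in seats:
--         i = seats.index(prev_seat)
--         return seats[(i + 1) % len(seats)]
--     mn = seats[0]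
--     best = None
--     for s in seats:
--         if s < mn:
--             mn = s
--         if prev_seat < s and (best is None or s < best):
--             best = s
--     return mn if best is None else best
-- ===== Notes on version B (the rewrite author's own statement) =====
-- stated objective: alternative
-- what changed: Replaces the sort-then-scan fallback (smallest seat greater than prev_seat, else minimum) with a single linear pass tracking the running minimum and the best greater seat; the membership branch is unchanged.
import Mathlib
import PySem

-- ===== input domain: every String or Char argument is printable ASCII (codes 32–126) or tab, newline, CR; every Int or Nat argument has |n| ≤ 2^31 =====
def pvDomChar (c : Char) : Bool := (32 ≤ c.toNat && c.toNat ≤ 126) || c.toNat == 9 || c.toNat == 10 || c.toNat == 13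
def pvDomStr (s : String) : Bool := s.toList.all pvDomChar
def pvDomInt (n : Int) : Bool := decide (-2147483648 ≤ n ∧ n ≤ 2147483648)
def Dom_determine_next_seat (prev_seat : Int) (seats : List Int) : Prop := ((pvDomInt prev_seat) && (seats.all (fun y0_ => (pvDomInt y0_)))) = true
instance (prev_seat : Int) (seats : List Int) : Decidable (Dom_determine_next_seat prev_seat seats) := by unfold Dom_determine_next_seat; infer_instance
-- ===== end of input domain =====

-- B replaces A's sort-then-scan fallback with a single linear pass (running minimum + best greater seat); equivalence proved for nonempty seats (A raises IndexError on []).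
-- (alternative algorithm; a timing run did not confirm a consistent speedup)


-- ===== PORT A =====
def determine_next_seat (prev_seat : Int) (seats : List Int) : Int :=
  match PySem.List.index? seats prev_seat with
  | some i =>
      (PySem.List.pyGet? seats (PySem.Int.mod ((i : Int) + 1) (seats.length : Int))).getD 0
  | none =>
      let sorted_seats := PySem.List.sorted seats (fun x => x) false
      match sorted_seats.find? (fun s => decide (prev_seat < s)) with
      | some s => s
      | none => (PySem.List.pyGet? sorted_seats 0).getD 0

-- ===== PORT B =====
def determine_next_seat_alt (prev_seat : Int) (seats : List Int) : Int :=
  if seats.contains prev_seat then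
    let i := (PySem.List.index? seats prev_seat).getD 0
    (PySem.List.pyGet? seats (PySem.Int.mod ((i : Int) + 1) (seats.length : Int))).getD 0
  else
    let r := seats.foldl
      (fun (p : Int × Option Int) s =>
        (if s < p.1 then s else p.1,
         if prev_seat < s && (match p.2 with | none => true | some x => decide (s < x))
         then some s else p.2))
      (seats.headD 0, none)
    match r.2 with
    | some x => x
    | none => r.1

-- ===== PRECONDITION & SPEC =====
-- Pre_ excludes only the empty list, on which Python A raises IndexError (B raises too).
def Pre_determine_next_seat (prev_seat : Int) (seats : List Int) : Prop := seats ≠ []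
instance (prev_seat : Int) (seats : List Int) : Decidable (Pre_determine_next_seat prev_seat seats) := by unfold Pre_determine_next_seat; infer_instance
def pvWitness_determine_next_seat : Int × List Int := (4, [5, 1, 3, 9])

def Spec_determine_next_seat (prev_seat : Int) (seats : List Int) (out : Int) : Prop := out = determine_next_seat_alt prev_seat seats
instance (prev_seat : Int) (seats : List Int) (out : Int) : Decidable (Spec_determine_next_seat prev_seat seats out) := by unfold Spec_determine_next_seat; infer_instance

-- ===== CLAIM (what is proved, stated in full; the proofs are below) =====
def Claim_equal_determine_next_seat : Prop := ∀ (prev_seat : Int) (seats : List Int), Dom_determine_next_seat prev_seat seats → Pre_determine_next_seat prev_seat seats → Spec_determine_next_seat prev_seat seats (determine_next_seat prev_seat seats)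

-- ===== LEMMAS AND PROOFS =====

-- named versions of the two component updates of B's fold (proof-side only)
def mstep (m s : Int) : Int := if s < m then s else m
def bstep (prev : Int) (b : Option Int) (s : Int) : Option Int :=
  if prev < s && (match b with | none => true | some x => decide (s < x)) then some s else b

-- B's fold updates the two components independently.
theorem foldl_pair_split (f : Int → Int → Int) (g : Option Int → Int → Option Int) :
    ∀ (l : List Int) (m : Int) (b : Option Int),
      l.foldl (fun p s => (f p.1 s, g p.2 s)) (m, b) = (l.foldl f m, l.foldl g b) := by
  intro l
  induction l with
  | nil => intro m b; rfl
  | cons a t ih => intro m b; simpa using ih (f m a) (g b a)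

theorem alt_fold_eq (prev_seat : Int) (seats : List Int) :
    seats.foldl
      (fun (p : Int × Option Int) s =>
        (if s < p.1 then s else p.1,
         if prev_seat < s && (match p.2 with | none => true | some x => decide (s < x))
         then some s else p.2))
      (seats.headD 0, none)
    = (seats.foldl mstep (seats.headD 0), seats.foldl (bstep prev_seat) none) :=
  foldl_pair_split mstep (bstep prev_seat) seats (seats.headD 0) none

-- the running-minimum fold
theorem mins_spec (l : List Int) : ∀ (m : Int),
    (l.foldl mstep m = m ∨ l.foldl mstep m ∈ l) ∧
      l.foldl mstep m ≤ m ∧ ∀ y ∈ l, l.foldl mstep m ≤ y := by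
  induction l with
  | nil => intro m; simp
  | cons a t ih =>
    intro m
    simp only [List.foldl_cons]
    rcases ih (mstep m a) with ⟨hmem, hle, hall⟩
    have hcases : mstep m a = a ∨ mstep m a = m := by unfold mstep; split_ifs <;> simp
    have hlem : mstep m a ≤ m := by unfold mstep; split_ifs <;> omega
    have hlea : mstep m a ≤ a := by unfold mstep; split_ifs <;> omega
    refine ⟨?_, le_trans hle hlem, ?_⟩
    · rcases hmem with h | h
      · rcases hcases with h2 | h2
        · right; rw [h, h2]; exact List.mem_cons_self
        · left; rw [h, h2]
      · right; exact List.mem_cons_of_mem _ h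
    · intro y hy
      rcases List.mem_cons.mp hy with h | h
      · subst h; omega
      · exact hall y h

-- the best-greater fold: invariant characterisation
theorem best_spec (prev : Int) : ∀ (l : List Int) (b : Option Int),
    (∀ y, b = some y → prev < y) →
    (l.foldl (bstep prev) b = none → b = none ∧ ∀ s ∈ l, ¬ prev < s) ∧
    (∀ x, l.foldl (bstep prev) b = some x →
      prev < x ∧ (x ∈ l ∨ b = some x) ∧ (∀ s ∈ l, prev < s → x ≤ s) ∧
      (∀ y, b = some y → x ≤ y)) := by
  intro l
  induction l with
  | nil =>
    intro b hb
    simp only [List.foldl_nil]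
    refine ⟨fun h => ⟨h, by simp⟩, fun x hx => ⟨hb x hx, Or.inr hx, by simp, ?_⟩⟩
    intro y hy
    rw [hy] at hx
    injection hx with h
    omega
  | cons a t ih =>
    intro b hb
    simp only [List.foldl_cons]
    by_cases hpa : prev < a
    · cases b with
      | none =>
        have heq : bstep prev none a = some a := by simp [bstep, hpa]
        rw [heq]
        have hb' : ∀ y : Int, (some a : Option Int) = some y → prev < y := by
          intro y hy; injection hy with h; omega
        rcases ih (some a) hb' with ⟨hn, hs⟩
        refine ⟨fun h => absurd (hn h).1 (by simp), fun x hx => ?_⟩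
        rcases hs x hx with ⟨h1, h2, h3, h4⟩
        refine ⟨h1, ?_, ?_, fun y hy => by simp at hy⟩
        · rcases h2 with h | h
          · exact Or.inl (List.mem_cons_of_mem _ h)
          · injection h with h; subst h; exact Or.inl List.mem_cons_self
        · intro s hs' hps
          rcases List.mem_cons.mp hs' with h | h
          · subst h; exact h4 _ rfl
          · exact h3 s h hps
      | some z =>
        by_cases hza : a < z
        · have heq : bstep prev (some z) a = some a := by simp [bstep, hpa, hza]
          rw [heq]
          have hb' : ∀ y : Int, (some a : Option Int) = some y → prev < y := by
            intro y hy; injection hy with h; omega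
          rcases ih (some a) hb' with ⟨hn, hs⟩
          refine ⟨fun h => absurd (hn h).1 (by simp), fun x hx => ?_⟩
          rcases hs x hx with ⟨h1, h2, h3, h4⟩
          refine ⟨h1, ?_, ?_, ?_⟩
          · rcases h2 with h | h
            · exact Or.inl (List.mem_cons_of_mem _ h)
            · injection h with h; subst h; exact Or.inl List.mem_cons_self
          · intro s hs' hps
            rcases List.mem_cons.mp hs' with h | h
            · subst h; exact h4 _ rfl
            · exact h3 s h hps
          · intro y hy
            injection hy with h; subst h
            have := h4 a rfl
            omega
        · have heq : bstep prev (some z) a = some z := by simp [bstep, hpa, hza]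
          rw [heq]
          rcases ih (some z) hb with ⟨hn, hs⟩
          refine ⟨fun h => absurd (hn h).1 (by simp), fun x hx => ?_⟩
          rcases hs x hx with ⟨h1, h2, h3, h4⟩
          refine ⟨h1, h2.imp (List.mem_cons_of_mem _) id, ?_, h4⟩
          intro s hs' hps
          rcases List.mem_cons.mp hs' with h | h
          · subst h; have := h4 z rfl; omega
          · exact h3 s h hps
    · have heq : bstep prev b a = b := by simp [bstep, hpa]
      rw [heq]
      rcases ih b hb with ⟨hn, hs⟩
      refine ⟨fun h => ⟨(hn h).1, ?_⟩, fun x hx => ?_⟩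
      · intro s hs'
        rcases List.mem_cons.mp hs' with h' | h'
        · subst h'; exact hpa
        · exact (hn h).2 s h'
      · rcases hs x hx with ⟨h1, h2, h3, h4⟩
        refine ⟨h1, h2.imp (List.mem_cons_of_mem _) id, ?_, h4⟩
        intro s hs' hps
        rcases List.mem_cons.mp hs' with h | h
        · subst h; exact absurd hps hpa
        · exact h3 s h hps

-- find? on a ≤-sorted list with an upward-closed predicate returns the least satisfying element
theorem find?_sorted_min (prev : Int) : ∀ (l : List Int), l.Pairwise (· ≤ ·) →
    ∀ x, l.find? (fun s => decide (prev < s)) = some x →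
      prev < x ∧ x ∈ l ∧ ∀ y ∈ l, prev < y → x ≤ y := by
  intro l
  induction l with
  | nil => intro _ x hx; simp at hx
  | cons a t ih =>
    intro hp x hx
    rcases List.pairwise_cons.mp hp with ⟨ha, ht⟩
    by_cases hpa : prev < a
    · have hxa : x = a := by
        simp [hpa] at hx
        omega
      subst hxa
      refine ⟨hpa, List.mem_cons_self, ?_⟩
      intro y hy _
      rcases List.mem_cons.mp hy with h | h
      · omega
      · exact ha y h
    · have hx' : t.find? (fun s => decide (prev < s)) = some x := by
        simpa [List.find?_cons, hpa] using hx
      rcases ih ht x hx' with ⟨h1, h2, h3⟩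
      refine ⟨h1, List.mem_cons_of_mem _ h2, ?_⟩
      intro y hy hpy
      rcases List.mem_cons.mp hy with h | h
      · subst h; exact absurd hpy hpa
      · exact h3 y h hpy

-- ===== VERDICT (by name: the statement is the Claim_ definition above) =====
theorem determine_next_seat_spec : Claim_equal_determine_next_seat := by
  intro prev seats _ hne
  unfold Spec_determine_next_seat determine_next_seat determine_next_seat_alt
  by_cases hmem : prev ∈ seats
  · have hc : seats.contains prev = true := by simpa using hmem
    have hi : (PySem.List.index? seats prev).isSome := (PySem.List.index?_isSome_iff _ _).mpr hmem
    rcases Option.isSome_iff_exists.mp hi with ⟨i, hI⟩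
    simp only [hI, hc, if_true]
    simp
  · have hc : seats.contains prev = false := by simpa using hmem
    have hI : PySem.List.index? seats prev = none := (PySem.List.index?_eq_none_iff _ _).mpr hmem
    simp only [hI, hc, Bool.false_eq_true, if_false]
    rw [alt_fold_eq]
    rcases mins_spec seats (seats.headD 0) with ⟨hm_mem, _, hm_all⟩
    have hbest := best_spec prev seats none (by simp)
    have hpair : (PySem.List.sorted seats (fun x => x) false).Pairwise (· ≤ ·) := by
      simpa using PySem.List.sorted_pairwise seats (fun x : Int => x)
    have hmemS : ∀ y : Int, y ∈ PySem.List.sorted seats (fun x => x) false ↔ y ∈ seats := by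
      intro y; exact PySem.List.mem_sorted seats (fun x => x) false y
    cases hF : (PySem.List.sorted seats (fun x => x) false).find? (fun s => decide (prev < s)) with
    | some s =>
      rcases find?_sorted_min prev _ hpair s hF with ⟨h1, h2, h3⟩
      have hsmem : s ∈ seats := (hmemS s).mp h2
      cases hB : seats.foldl (bstep prev) none with
      | none => exact absurd h1 (((hbest.1 hB).2 s hsmem))
      | some x =>
        rcases hbest.2 x hB with ⟨hx1, hx2, hx3, _⟩
        have hxmem : x ∈ seats := by
          rcases hx2 with h | h
          · exact h
          · simp at h
        have h1' : x ≤ s := hx3 s hsmem h1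
        have h2' : s ≤ x := h3 x ((hmemS x).mpr hxmem) hx1
        show s = x
        omega
    | none =>
      have hno : ∀ y ∈ seats, ¬ prev < y := by
        intro y hy
        have := List.find?_eq_none.mp hF y ((hmemS y).mpr hy)
        simpa using this
      cases hB : seats.foldl (bstep prev) none with
      | some x =>
        exfalso
        rcases hbest.2 x hB with ⟨hx1, hx2, _, _⟩
        have hxmem : x ∈ seats := by
          rcases hx2 with h | h
          · exact h
          · simp at h
        exact hno x hxmem hx1
      | none =>
        rcases List.exists_cons_of_ne_nil hne with ⟨h0, t0, hseats⟩
        have hsne : PySem.List.sorted seats (fun x => x) false ≠ [] := by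
          intro h
          rw [PySem.List.sorted_eq_nil_iff] at h
          exact hne h
        rcases List.exists_cons_of_ne_nil hsne with ⟨m, tm, hS⟩
        have hmmin : ∀ y ∈ seats, m ≤ y := by
          intro y hy
          simpa using PySem.List.key_head_sorted_le seats (fun x : Int => x) hS y hy
        have hmmem : m ∈ seats := (hmemS m).mp (hS ▸ List.mem_cons_self)
        have hrmem : seats.foldl mstep (seats.headD 0) ∈ seats := by
          rcases hm_mem with h | h
          · rw [h, hseats]; exact List.mem_cons_self
          · exact h
        have h1 := hm_all m hmmem
        have h2 := hmmin _ hrmem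
        show (PySem.List.pyGet? (PySem.List.sorted seats (fun x => x) false) 0).getD 0
          = seats.foldl mstep (seats.headD 0)
        rw [hS, PySem.List.pyGet?_zero_cons]
        simp only [Option.getD_some]
        omega
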